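-- pv_equiv track=rewrite | github.com/shindongyeop/algorithms-level-3 | 57_math-exam-new2.py | solution
-- ===== SOURCE A (Python) =====
-- def solution(answers):
--     # Patterns for each student
--     patterns = [
--         [1, 2, 3, 4, 5],                # Student 1
--         [2, 1, 2, 3, 2, 4, 2, 5],       # Student 2
--         [3, 3, 1, 1, 2, 2, 4, 4, 5, 5]  # Student 3
--     ]
--
--     scores = [0, 0, 0]  # Initialize scores for each student
--
--     # Calculate the score for each student without using enumerate
--     for i in range(len(answers)):
--         # Student 1
--         if answers[i] == patterns[0][i % len(patterns[0])]:
--             scores[0] += 1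
--         # Student 2
--         if answers[i] == patterns[1][i % len(patterns[1])]:
--             scores[1] += 1
--         # Student 3
--         if answers[i] == patterns[2][i % len(patterns[2])]:
--             scores[2] += 1
--
--     # Find the maximum score
--     max_score = max(scores)
--
--     # Collect the students who have the highest score
--     top_students = []
--     for i in range(len(scores)):
--         if scores[i] == max_score:
--             top_students.append(i + 1)  # Student numbering starts at 1
--
--     return top_students
-- ===== SOURCE B (Python) =====
-- from collections import Counter
--
-- def solution(answers):
--     patterns = [
--         [1, 2, 3, 4, 5],
--         [2, 1, 2, 3, 2, 4, 2, 5],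
--         [3, 3, 1, 1, 2, 2, 4, 4, 5, 5],
--     ]
--     L = 40  # lcm of the pattern lengths: every pattern repeats with period dividing 40
--     hist = Counter((i % L, a) for i, a in enumerate(answers))
--     scores = [sum(hist[(r, pat[r % len(pat)])] for r in range(L)) for pat in patterns]
--     best = max(scores)
--     return [i + 1 for i, s in enumerate(scores) if s == best]
-- ===== Notes on version B (the rewrite author's own statement) =====
-- stated objective: alternative
-- what changed: B never compares answers with patterns directly: it builds a Counter histogram keyed by (index mod 40, answer) in one pass (40 = lcm of the pattern lengths), then each student's score is a sum of 40 table lookups hist[(r, pattern[r % len])]; A instead does three per-position pattern comparisons inside its index loop.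
import Mathlib
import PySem

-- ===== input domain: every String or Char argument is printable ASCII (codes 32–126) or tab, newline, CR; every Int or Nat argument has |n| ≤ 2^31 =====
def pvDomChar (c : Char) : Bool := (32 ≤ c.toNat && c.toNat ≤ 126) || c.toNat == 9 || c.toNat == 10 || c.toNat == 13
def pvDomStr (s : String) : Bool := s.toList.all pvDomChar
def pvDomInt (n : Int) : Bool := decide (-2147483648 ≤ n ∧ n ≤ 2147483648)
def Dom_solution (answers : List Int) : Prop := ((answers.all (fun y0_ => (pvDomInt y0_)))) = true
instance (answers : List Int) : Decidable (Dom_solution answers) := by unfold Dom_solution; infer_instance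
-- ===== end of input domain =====

-- B replaces A's per-position pattern comparisons with a histogram keyed by (index mod 40, answer)
-- built once, each score then read off as a sum of 40 table lookups; same O(n) cost, values proved equal.

-- ===== PORT A =====
-- A's single index loop 'for i in range(len(answers))': the obvious structural recursion over
-- answers carrying the index i and the three scores; answers[i] is the head at each step.
def aLoop (p1 p2 p3 : List Int) : List Int → Nat → Int × Int × Int → Int × Int × Int
  | [], _, s => s
  | a :: rest, i, (s1, s2, s3) =>
    aLoop p1 p2 p3 rest (i + 1)
      ((if a = p1.getD (i % p1.length) 0 then s1 + 1 else s1),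
       (if a = p2.getD (i % p2.length) 0 then s2 + 1 else s2),
       (if a = p3.getD (i % p3.length) 0 then s3 + 1 else s3))

def solution (answers : List Int) : List Int :=
  let scores := aLoop [1, 2, 3, 4, 5] [2, 1, 2, 3, 2, 4, 2, 5] [3, 3, 1, 1, 2, 2, 4, 4, 5, 5]
      answers 0 (0, 0, 0)
  let sl : List Int := [scores.1, scores.2.1, scores.2.2]
  let maxScore := (PySem.List.max? sl (fun y => y)).getD 0
  -- 'for i in range(len(scores)): if scores[i] == max_score: top_students.append(i+1)'
  (List.range sl.length).foldl
    (fun acc i => if sl.getD i 0 = maxScore then acc ++ [(i : Int) + 1] else acc) []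

-- ===== PORT B =====
-- hist = Counter((i % 40, a) for i, a in enumerate(answers));
-- scores = [sum(hist[(r, pat[r % len(pat)])] for r in range(40)) for pat in patterns]
def solution_alt (answers : List Int) : List Int :=
  let patterns : List (List Int) :=
    [[1, 2, 3, 4, 5], [2, 1, 2, 3, 2, 4, 2, 5], [3, 3, 1, 1, 2, 2, 4, 4, 5, 5]]
  let hist := PySem.Dict.counter
    ((PySem.List.enumerate answers).map (fun ia => (PySem.Int.mod ia.1 40, ia.2)))
  let scores := patterns.map (fun pat =>
    ((List.range 40).map (fun (r : Nat) => hist.getD ((r : Int), pat.getD (r % pat.length) 0) 0)).sum)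
  let best := (PySem.List.max? scores (fun y => y)).getD 0
  -- [i + 1 for i, s in enumerate(scores) if s == best]
  (PySem.List.enumerate scores).filterMap
    (fun is => if is.2 = best then some (is.1 + 1) else none)

-- ===== PRECONDITION & SPEC =====
def Spec_solution (answers : List Int) (out : List Int) : Prop := out = solution_alt answers
instance (answers : List Int) (out : List Int) : Decidable (Spec_solution answers out) := by unfold Spec_solution; infer_instance

-- ===== CLAIM (what is proved, stated in full; the proofs are below) =====
def Claim_equal_solution : Prop := ∀ (answers : List Int), Dom_solution answers → Spec_solution answers (solution answers)

-- ===== LEMMAS AND PROOFS =====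

-- number of matches of l against pat cycled, starting at index i (proof-only characterisation)
def cnt (pat : List Int) : List Int → Nat → Int
  | [], _ => 0
  | a :: rest, i => (if a = pat.getD (i % pat.length) 0 then 1 else 0) + cnt pat rest (i + 1)

lemma aLoop_eq_cnt (p1 p2 p3 : List Int) (l : List Int) (i : Nat) (s1 s2 s3 : Int) :
    aLoop p1 p2 p3 l i (s1, s2, s3)
      = (s1 + cnt p1 l i, s2 + cnt p2 l i, s3 + cnt p3 l i) := by
  induction l generalizing i s1 s2 s3 with
  | nil => simp [aLoop, cnt]
  | cons a rest ih =>
    simp only [aLoop, cnt, ih]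
    refine Prod.ext ?_ (Prod.ext ?_ ?_) <;> simp <;> split <;> ring

-- Σ_{r<n} [r = r0 ∧ P r] = [P r0] when r0 < n
lemma sum_indicator (n r0 : Nat) (h : r0 < n) (P : Nat → Prop) [DecidablePred P] :
    ((List.range n).map (fun (r : Nat) => if r = r0 ∧ P r then (1 : Int) else 0)).sum
      = if P r0 then 1 else 0 := by
  induction n with
  | zero => omega
  | succ m ih =>
    rw [List.range_succ, List.map_append, List.sum_append]
    by_cases hm : r0 < m
    · rw [ih hm]; simp; omega
    · have : r0 = m := by omega
      subst this
      have : ((List.range r0).map (fun (r : Nat) => if r = r0 ∧ P r then (1 : Int) else 0)).sum = 0 := by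
        apply List.sum_eq_zero; intro x hx
        simp only [List.mem_map, List.mem_range] at hx
        obtain ⟨r, hr, rfl⟩ := hx
        simp; omega
      simp [this]

-- the histogram sum for one pattern equals the direct match count, for any start index
lemma hist_sum_eq_cnt (pat : List Int) (hdvd : pat.length ∣ 40) (l : List Int) (s : Nat) :
    ((List.range 40).map (fun (r : Nat) =>
        (((((PySem.List.enumerate l (s : Int)).map (fun ia => (PySem.Int.mod ia.1 40, ia.2))).count
          ((r : Int), pat.getD (r % pat.length) 0)) : Nat) : Int))).sum
      = cnt pat l s := by
  induction l generalizing s with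
  | nil => simp [PySem.List.enumerate_nil, cnt]
  | cons a rest ih =>
    rw [PySem.List.enumerate_cons]
    simp only [List.map_cons, cnt]
    have hmod : PySem.Int.mod (s : Int) 40 = ((s % 40 : Nat) : Int) := by
      exact_mod_cast PySem.Int.mod_natCast s 40
    have hcount : ∀ r : Nat,
        ((((PySem.Int.mod (s : Int) 40, a) :: (PySem.List.enumerate rest ((s : Int) + 1)).map
            (fun ia => (PySem.Int.mod ia.1 40, ia.2))).count
          ((r : Int), pat.getD (r % pat.length) 0) : Nat) : Int)
        = (((PySem.List.enumerate rest ((s : Int) + 1)).map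
            (fun ia => (PySem.Int.mod ia.1 40, ia.2))).count ((r : Int), pat.getD (r % pat.length) 0) : Int)
          + (if r = s % 40 ∧ a = pat.getD (r % pat.length) 0 then (1 : Int) else 0) := by
      intro r
      rw [List.count_cons, hmod]
      push_cast
      congr 1
      simp only [beq_iff_eq, Prod.mk.injEq]
      by_cases hc : r = s % 40 ∧ a = pat.getD (r % pat.length) 0
      · obtain ⟨h1, h2⟩ := hc
        subst h1
        simp [h2]
      · rw [if_neg hc, if_neg]
        rintro ⟨h1, h2⟩
        exact hc ⟨by exact_mod_cast h1.symm, h2⟩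
    have hrw : ((List.range 40).map (fun (r : Nat) =>
          ((((PySem.Int.mod (s : Int) 40, a) :: (PySem.List.enumerate rest ((s : Int) + 1)).map
              (fun ia => (PySem.Int.mod ia.1 40, ia.2))).count
            ((r : Int), pat.getD (r % pat.length) 0) : Nat) : Int))).sum
        = ((List.range 40).map (fun (r : Nat) =>
            (((((PySem.List.enumerate rest ((s : Int) + 1)).map
              (fun ia => (PySem.Int.mod ia.1 40, ia.2))).count
              ((r : Int), pat.getD (r % pat.length) 0)) : Nat) : Int))).sum
          + ((List.range 40).map (fun (r : Nat) =>
              if r = s % 40 ∧ a = pat.getD (r % pat.length) 0 then (1 : Int) else 0)).sum := by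
      rw [← List.sum_map_add]
      apply congrArg
      apply List.map_congr_left
      intro r _
      exact hcount r
    rw [hrw]
    have hs1 : ((s : Int) + 1) = ((s + 1 : Nat) : Int) := by push_cast; ring
    rw [hs1, ih (s + 1)]
    rw [sum_indicator 40 (s % 40) (Nat.mod_lt _ (by norm_num))
      (fun r => a = pat.getD (r % pat.length) 0)]
    have hred : (s % 40) % pat.length = s % pat.length := Nat.mod_mod_of_dvd s hdvd
    rw [hred]
    ring

-- the tail of both programs: the same selection from the same three scores
lemma finish_eq (s1 s2 s3 : Int) :
    (List.range ([s1, s2, s3] : List Int).length).foldl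
      (fun acc i => if ([s1, s2, s3] : List Int).getD i 0
          = (PySem.List.max? [s1, s2, s3] (fun y => y)).getD 0 then acc ++ [(i : Int) + 1] else acc) []
    = (PySem.List.enumerate [s1, s2, s3]).filterMap
        (fun is => if is.2 = (PySem.List.max? [s1, s2, s3] (fun y => y)).getD 0
          then some (is.1 + 1) else none) := by
  simp [List.range_succ, PySem.List.enumerate, List.filterMap]
  split_ifs <;> simp

-- ===== VERDICT (by name: the statement is the Claim_ definition above) =====
set_option maxHeartbeats 1000000 in
theorem solution_spec : Claim_equal_solution := by
  intro answers _
  unfold Spec_solution solution solution_alt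
  simp only [List.map]
  rw [aLoop_eq_cnt]
  simp only [PySem.Dict.getD_counter]
  have e1 := hist_sum_eq_cnt [1, 2, 3, 4, 5] (by norm_num) answers 0
  have e2 := hist_sum_eq_cnt [2, 1, 2, 3, 2, 4, 2, 5] (by norm_num) answers 0
  have e3 := hist_sum_eq_cnt [3, 3, 1, 1, 2, 2, 4, 4, 5, 5] (by norm_num) answers 0
  simp only [Nat.cast_zero] at e1 e2 e3
  simp only [e1, e2, e3, zero_add]
  exact finish_eq (cnt [1, 2, 3, 4, 5] answers 0)
    (cnt [2, 1, 2, 3, 2, 4, 2, 5] answers 0) (cnt [3, 3, 1, 1, 2, 2, 4, 4, 5, 5] answers 0)
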